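-- pv_equiv track=rewrite | github.com/wyk18703232953/myResearch | codeComplex/data/filteredData/python/constant/python_constant_0169.py | snake_pattern
-- ===== SOURCE A (Python) =====
-- def snake_pattern(n, m):
--     lines = []
--     for i in range(n):
--         lines.append(['#' * m,
--                       '.' * (m - 1) + '#',
--                       '#' * m,
--                       '#' + '.' * (m - 1)][i % 4])
--     return lines
-- ===== SOURCE B (Python) =====
-- def snake_pattern(n, m):
--     if n <= 0:
--         return []
--     rows = ['#' * m] * n
--     rows[1::4] = ['.' * (m - 1) + '#'] * len(rows[1::4])
--     rows[3::4] = ['#' + '.' * (m - 1)] * len(rows[3::4])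
--     return rows
-- ===== Notes on version B (the rewrite author's own statement) =====
-- stated objective: alternative
-- what changed: Replaces A's per-row loop with %4 indexing into a pattern table by a staged bulk construction: replicate the full '#' row n times, then overwrite the two kinds of turn rows with strided slice assignments rows[1::4] and rows[3::4].
import Mathlib
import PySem

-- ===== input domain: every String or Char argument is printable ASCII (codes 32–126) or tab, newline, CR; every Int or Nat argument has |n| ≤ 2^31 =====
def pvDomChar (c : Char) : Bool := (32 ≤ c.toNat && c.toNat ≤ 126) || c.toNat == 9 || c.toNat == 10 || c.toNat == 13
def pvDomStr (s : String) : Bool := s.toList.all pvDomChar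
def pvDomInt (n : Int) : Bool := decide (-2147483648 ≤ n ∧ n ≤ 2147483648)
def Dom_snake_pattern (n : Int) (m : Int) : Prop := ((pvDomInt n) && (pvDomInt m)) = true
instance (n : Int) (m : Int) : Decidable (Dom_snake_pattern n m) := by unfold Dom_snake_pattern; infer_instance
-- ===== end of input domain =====

-- B replaces A's per-row loop with %4 indexing by a staged bulk construction: replicate the
-- full row n times, then overwrite rows[1::4] and rows[3::4] with the two turn rows; objective: alternative.

-- ===== PORT A =====
-- the four pattern strings of A's inline list ('#'*m etc. are PySem.List.pyRepeat on the
-- character lists — exact, '' for m ≤ 0)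
def pvPats (m : Int) : List String :=
  [ String.ofList (PySem.List.pyRepeat ['#'] m),
    String.ofList (PySem.List.pyRepeat ['.'] (m - 1) ++ ['#']),
    String.ofList (PySem.List.pyRepeat ['#'] m),
    String.ofList ('#' :: PySem.List.pyRepeat ['.'] (m - 1)) ]

-- literal port: for i in range(n): lines.append(patterns[i % 4]); i % 4 ∈ {0,1,2,3} so the
-- Python indexing never raises and pyGetD with default "" is exact
def snake_pattern (n : Int) (m : Int) : List String :=
  (PySem.List.pyRange 0 n 1).foldl
    (fun lines i => lines ++ [PySem.List.pyGetD (pvPats m) (PySem.Int.mod i 4) ""]) []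

-- ===== PORT B =====
-- hand port of Python's equal-length strided slice assignment rows[start::4] = [v]*count:
-- replaces exactly the elements at indices i with i ≥ start and (i-start) % 4 = 0 (exact here
-- because the assigned list has the same length as the selected slice)
def pvSetStride4 (xs : List String) (start : Nat) (v : String) : List String :=
  xs.mapIdx (fun i x => if start ≤ i ∧ (i - start) % 4 = 0 then v else x)

def snake_pattern_alt (n : Int) (m : Int) : List String :=
  if n ≤ 0 then []
  else
    pvSetStride4
      (pvSetStride4 (List.replicate n.toNat (String.ofList (PySem.List.pyRepeat ['#'] m)))
        1 (String.ofList (PySem.List.pyRepeat ['.'] (m - 1) ++ ['#'])))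
      3 (String.ofList ('#' :: PySem.List.pyRepeat ['.'] (m - 1)))

-- ===== PRECONDITION & SPEC =====
def Spec_snake_pattern (n : Int) (m : Int) (out : List String) : Prop := out = snake_pattern_alt n m
instance (n : Int) (m : Int) (out : List String) : Decidable (Spec_snake_pattern n m out) := by unfold Spec_snake_pattern; infer_instance

-- ===== CLAIM (what is proved, stated in full; the proofs are below) =====
def Claim_equal_snake_pattern : Prop := ∀ (n : Int) (m : Int), Dom_snake_pattern n m → Spec_snake_pattern n m (snake_pattern n m)

-- ===== LEMMAS AND PROOFS =====

-- the loop body of A, at a nonnegative index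
lemma pv_elem (m : Int) (k : Nat) :
    PySem.List.pyGetD (pvPats m) (PySem.Int.mod (0 + (k : Int)) 4) ""
      = (pvPats m).getD (k % 4) "" := by
  have h : PySem.Int.mod (0 + (k : Int)) 4 = ((k % 4 : Nat) : Int) := by
    rw [zero_add]
    exact_mod_cast PySem.Int.mod_natCast k 4
  rw [h, PySem.List.pyGetD_natCast]

lemma pv_setStride4_getElem (xs : List String) (start : Nat) (v : String) (k : Nat)
    (hk : k < (pvSetStride4 xs start v).length) (hk' : k < xs.length) :
    (pvSetStride4 xs start v)[k]'hk
      = if start ≤ k ∧ (k - start) % 4 = 0 then v else xs[k]'hk' := by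
  simp [pvSetStride4]

-- ===== VERDICT (by name: the statement is the Claim_ definition above) =====
theorem snake_pattern_spec : Claim_equal_snake_pattern := by
  intro n m _
  unfold Spec_snake_pattern snake_pattern snake_pattern_alt
  by_cases hn : n ≤ 0
  · have h1 : PySem.List.pyRange 0 n 1 = [] := PySem.List.pyRange_one_eq_nil (by omega)
    rw [h1, if_pos hn]
    rfl
  · rw [if_neg hn]
    rw [PySem.List.foldl_append_singleton_eq_map, PySem.List.pyRange_one, List.nil_append]
    have hsub : (n - 0).toNat = n.toNat := by omega
    rw [hsub]
    apply List.ext_getElem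
    · simp [pvSetStride4]
    · intro k hk1 hk2
      have hkn : k < n.toNat := by simpa using hk1
      have hlen1 : k < (pvSetStride4 (List.replicate n.toNat
          (String.ofList (PySem.List.pyRepeat ['#'] m))) 1
          (String.ofList (PySem.List.pyRepeat ['.'] (m - 1) ++ ['#']))).length := by
        simp [pvSetStride4, hkn]
      have hlen0 : k < (List.replicate n.toNat
          (String.ofList (PySem.List.pyRepeat ['#'] m))).length := by simp [hkn]
      rw [List.getElem_map, List.getElem_map, List.getElem_range, pv_elem,
          pv_setStride4_getElem _ _ _ _ hk2 hlen1,
          pv_setStride4_getElem _ _ _ _ hlen1 hlen0, List.getElem_replicate]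
      have h4 : k % 4 = 0 ∨ k % 4 = 1 ∨ k % 4 = 2 ∨ k % 4 = 3 := by omega
      rcases h4 with h | h | h | h
      · simp only [h]; rw [if_neg (by omega), if_neg (by omega)]; rfl
      · simp only [h]; rw [if_neg (by omega), if_pos (by omega)]; rfl
      · simp only [h]; rw [if_neg (by omega), if_neg (by omega)]; rfl
      · simp only [h]; rw [if_pos (by omega)]; rfl
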